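-- pv_equiv track=rewrite | github.com/pypi-data/pypi-mirror-165 | packages/aplus-auth/aplus_auth-0.2.3-py3-none-any.whl/aplus_auth/__init__.py | _match_url
-- ===== SOURCE A (Python) =====
-- from typing import Any, Dict, List, Optional, TYPE_CHECKING, Type, Union
--
-- def _match_url(path: str, url_to_uid: Optional[Dict[str, str]]) -> Optional[str]:
--     if url_to_uid is None:
--         return None
--
--     uid = None
--     max_length = -1
--     for k,v in url_to_uid.items():
--         if path.startswith(k) and len(k) > max_length:
--             max_length = len(k)
--             uid = v
--     return uid
-- ===== SOURCE B (Python) =====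
-- def _match_url(path, url_to_uid):
--     if url_to_uid is None:
--         return None
--     for i in range(len(path), -1, -1):
--         if path[:i] in url_to_uid:
--             return url_to_uid[path[:i]]
--     return None
-- ===== Notes on version B (the rewrite author's own statement) =====
-- stated objective: alternative
-- what changed: Instead of scanning every dict entry while tracking the max matching key length, B walks the prefixes of path from longest to shortest and returns the dict value at the first prefix that is a key (O(|path|) hash lookups instead of O(#keys) prefix tests).
import Mathlib
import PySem

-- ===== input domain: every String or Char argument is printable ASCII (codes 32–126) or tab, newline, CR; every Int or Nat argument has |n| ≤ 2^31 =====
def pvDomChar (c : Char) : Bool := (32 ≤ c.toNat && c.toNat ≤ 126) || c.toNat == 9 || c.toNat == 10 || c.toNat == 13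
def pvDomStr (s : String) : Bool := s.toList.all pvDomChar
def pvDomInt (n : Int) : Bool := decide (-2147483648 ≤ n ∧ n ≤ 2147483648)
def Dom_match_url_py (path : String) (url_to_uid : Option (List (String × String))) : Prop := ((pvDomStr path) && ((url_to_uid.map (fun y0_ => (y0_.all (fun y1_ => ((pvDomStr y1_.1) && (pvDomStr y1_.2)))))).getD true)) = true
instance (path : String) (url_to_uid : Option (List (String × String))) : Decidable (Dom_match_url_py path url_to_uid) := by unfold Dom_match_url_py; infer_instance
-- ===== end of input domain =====

-- B replaces A's scan over all dict entries (tracking the max matching key length) by a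
-- longest-first walk over the prefixes of path, returning the value at the first prefix
-- that is a key; alternative decomposition, same results.

-- ===== PORT A =====
-- loop body of A's 'for k,v in url_to_uid.items(): if path.startswith(k) and len(k) > max_length: …'
def matchUrlStep (path : String) (st : Option String × Int) (kv : String × String) : Option String × Int :=
  if PySem.Str.startswith path kv.1 = true ∧ st.2 < PySem.Str.len kv.1 then
    (some kv.2, PySem.Str.len kv.1)
  else st

def match_url_py (path : String) (url_to_uid : Option (List (String × String))) : Option String :=
  match url_to_uid with
  | none => none
  | some items => (items.foldl (matchUrlStep path) (none, -1)).1

-- ===== PORT B =====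
-- path[:i]
def matchUrlPrefix (path : String) (i : Nat) : String := PySem.Str.slice path none (some (i : Int))

-- the 'for i in range(len(path), -1, -1)' loop of B, counting i down; dict membership+lookup
-- is first-match association-list lookup
def matchUrlAltGo (path : String) (d : List (String × String)) : Nat → Option String
  | 0 => List.lookup (matchUrlPrefix path 0) d
  | i + 1 =>
    match List.lookup (matchUrlPrefix path (i + 1)) d with
    | some v => some v
    | none => matchUrlAltGo path d i

def match_url_py_alt (path : String) (url_to_uid : Option (List (String × String))) : Option String :=
  match url_to_uid with
  | none => none
  | some d => matchUrlAltGo path d (PySem.Str.len path).toNat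

-- ===== PRECONDITION & SPEC =====
def Spec_match_url_py (path : String) (url_to_uid : Option (List (String × String))) (out : Option String) : Prop := out = match_url_py_alt path url_to_uid
instance (path : String) (url_to_uid : Option (List (String × String))) (out : Option String) : Decidable (Spec_match_url_py path url_to_uid out) := by unfold Spec_match_url_py; infer_instance

-- ===== CLAIM (what is proved, stated in full; the proofs are below) =====
def Claim_equal_match_url_py : Prop := ∀ (path : String) (url_to_uid : Option (List (String × String))), Dom_match_url_py path url_to_uid → Spec_match_url_py path url_to_uid (match_url_py path url_to_uid)

-- ===== LEMMAS AND PROOFS =====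

lemma matchUrlStep_pos (path : String) (st : Option String × Int) (kv : String × String)
    (h1 : PySem.Str.startswith path kv.1 = true) (h2 : st.2 < PySem.Str.len kv.1) :
    matchUrlStep path st kv = (some kv.2, PySem.Str.len kv.1) := by
  unfold matchUrlStep; rw [if_pos ⟨h1, h2⟩]

lemma matchUrlStep_neg (path : String) (st : Option String × Int) (kv : String × String)
    (h : ¬ (PySem.Str.startswith path kv.1 = true ∧ st.2 < PySem.Str.len kv.1)) :
    matchUrlStep path st kv = st := by
  unfold matchUrlStep; rw [if_neg h]

lemma prefix_toList (path : String) (i : Nat) :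
    (matchUrlPrefix path i).toList = path.toList.take i := by
  simp [matchUrlPrefix, PySem.List.slice_to]

lemma startswith_iff (path k : String) :
    PySem.Str.startswith path k = true ↔ k.toList <+: path.toList := by
  simp [PySem.Chars.startswith_iff]

-- a matching key IS the prefix of path of its own length
lemma matching_eq_prefix (path k : String) (h : k.toList <+: path.toList) :
    k = matchUrlPrefix path k.toList.length := by
  apply String.toList_inj.mp
  rw [prefix_toList]
  exact (List.prefix_iff_eq_take.mp h)

lemma prefix_matching (path : String) (i : Nat) :
    (matchUrlPrefix path i).toList <+: path.toList := by
  rw [prefix_toList]; exact List.take_prefix i path.toList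

lemma prefix_length (path : String) (i : Nat) (h : i ≤ path.toList.length) :
    (matchUrlPrefix path i).toList.length = i := by
  rw [prefix_toList, List.length_take]; exact Nat.min_eq_left h

lemma lookup_eq_none_iff {β : Type} (k : String) (d : List (String × β)) :
    List.lookup k d = none ↔ ∀ kv ∈ d, kv.1 ≠ k := by
  induction d with
  | nil => simp
  | cons hd tl ih =>
    rcases hd with ⟨a, b⟩
    by_cases h : a = k
    · subst h; simp [List.lookup]
    · have hb : (k == a) = false := by simp [Ne.symm h]
      simp [List.lookup, hb, ih, h]

lemma lookup_mem {β : Type} (k : String) (d : List (String × β)) (h : List.lookup k d ≠ none) :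
    ∃ kv ∈ d, kv.1 = k := by
  by_contra hc
  exact h ((lookup_eq_none_iff k d).mpr (fun kv hkv he => hc ⟨kv, hkv, he⟩))

-- characterisation of A's fold
lemma A_char (path : String) (d : List (String × String)) :
    (d.foldl (matchUrlStep path) (none, -1) = ((none : Option String), (-1 : Int))
        ∧ ∀ kv ∈ d, ¬ kv.1.toList <+: path.toList)
  ∨ (∃ L : Nat, L ≤ path.toList.length
        ∧ List.lookup (matchUrlPrefix path L) d ≠ none
        ∧ (∀ kv ∈ d, kv.1.toList <+: path.toList → kv.1.toList.length ≤ L)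
        ∧ d.foldl (matchUrlStep path) (none, -1)
            = (List.lookup (matchUrlPrefix path L) d, (L : Int))) := by
  induction d using List.reverseRecOn with
  | nil => left; simp
  | append_singleton d kv ih =>
    rw [List.foldl_append]
    rcases ih with ⟨hst, hno⟩ | ⟨L, hLn, hsome, hmax, hst⟩
    · rw [hst]
      by_cases hm : kv.1.toList <+: path.toList
      · right
        refine ⟨kv.1.toList.length, hm.length_le, ?_, ?_, ?_⟩
        · rw [← matching_eq_prefix path kv.1 hm, List.lookup_append]
          rcases h1 : List.lookup kv.1 d with _ | v
          · simp [List.lookup]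
          · simp
        · intro kv' hkv' hm'
          rcases List.mem_append.mp hkv' with h | h
          · exact absurd hm' (hno kv' h)
          · simp only [List.mem_singleton] at h; subst h; exact le_refl _
        · have hsw : PySem.Str.startswith path kv.1 = true := (startswith_iff path kv.1).mpr hm
          have hlen : PySem.Str.len kv.1 = (kv.1.toList.length : Int) := by simp
          simp only [List.foldl_cons, List.foldl_nil]
          rw [matchUrlStep_pos path _ kv hsw
            (by rw [hlen]; exact lt_of_lt_of_le (by norm_num) (Int.natCast_nonneg _))]
          congr 1
          · rw [← matching_eq_prefix path kv.1 hm, List.lookup_append,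
              (lookup_eq_none_iff kv.1 d).mpr (fun kv' h' => by
                intro he; exact (hno kv' h') (he ▸ hm))]
            simp [List.lookup]
      · left
        constructor
        · simp only [List.foldl_cons, List.foldl_nil]
          rw [matchUrlStep_neg path _ kv (by
            rintro ⟨hsw, -⟩
            exact hm ((startswith_iff path kv.1).mp hsw))]
        · intro kv' hkv'
          rcases List.mem_append.mp hkv' with h | h
          · exact hno kv' h
          · simp only [List.mem_singleton] at h; subst h; exact hm
    · right
      rw [hst]
      by_cases hm : kv.1.toList <+: path.toList
      · by_cases hgt : L < kv.1.toList.length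
        · -- new, strictly longer matching key
          refine ⟨kv.1.toList.length, hm.length_le, ?_, ?_, ?_⟩
          · rw [← matching_eq_prefix path kv.1 hm, List.lookup_append]
            rcases h1 : List.lookup kv.1 d with _ | v
            · simp [List.lookup]
            · simp
          · intro kv' hkv' hm'
            rcases List.mem_append.mp hkv' with h | h
            · exact le_trans (hmax kv' h hm') (le_of_lt hgt)
            · simp only [List.mem_singleton] at h; subst h; exact le_refl _
          · have hsw : PySem.Str.startswith path kv.1 = true := (startswith_iff path kv.1).mpr hm
            have hlen : PySem.Str.len kv.1 = (kv.1.toList.length : Int) := by simp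
            simp only [List.foldl_cons, List.foldl_nil]
            rw [matchUrlStep_pos path _ kv hsw
              (by show (L:Int) < PySem.Str.len kv.1; rw [hlen]; exact_mod_cast hgt)]
            congr 1
            · have hnotin : List.lookup kv.1 d = none := by
                rw [lookup_eq_none_iff]
                intro kv' h' he
                have := hmax kv' h' (he ▸ hm)
                rw [he] at this
                omega
              rw [← matching_eq_prefix path kv.1 hm, List.lookup_append, hnotin]
              simp [List.lookup]
        · -- matching but not longer: state unchanged
          rw [not_lt] at hgt
          refine ⟨L, hLn, ?_, ?_, ?_⟩
          · rw [List.lookup_append]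
            rcases h1 : List.lookup (matchUrlPrefix path L) d with _ | v
            · exact absurd h1 hsome
            · simp
          · intro kv' hkv' hm'
            rcases List.mem_append.mp hkv' with h | h
            · exact hmax kv' h hm'
            · simp only [List.mem_singleton] at h; subst h; exact hgt
          · simp only [List.foldl_cons, List.foldl_nil]
            rw [matchUrlStep_neg path _ kv (by
                rintro ⟨-, hlt⟩
                have hlen : PySem.Str.len kv.1 = (kv.1.toList.length : Int) := by simp
                rw [hlen] at hlt
                have hlt' : (L : Int) < (kv.1.toList.length : Int) := hlt
                have : L < kv.1.toList.length := by exact_mod_cast hlt'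
                omega)]
            congr 1
            rw [List.lookup_append]
            rcases h1 : List.lookup (matchUrlPrefix path L) d with _ | v
            · exact absurd h1 hsome
            · simp
      · -- kv not matching: state unchanged
        refine ⟨L, hLn, ?_, ?_, ?_⟩
        · rw [List.lookup_append]
          rcases h1 : List.lookup (matchUrlPrefix path L) d with _ | v
          · exact absurd h1 hsome
          · simp
        · intro kv' hkv' hm'
          rcases List.mem_append.mp hkv' with h | h
          · exact hmax kv' h hm'
          · simp only [List.mem_singleton] at h; subst h; exact absurd hm' hm
        · simp only [List.foldl_cons, List.foldl_nil]
          rw [matchUrlStep_neg path _ kv (by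
              rintro ⟨hsw, -⟩
              exact hm ((startswith_iff path kv.1).mp hsw))]
          congr 1
          rw [List.lookup_append]
          rcases h1 : List.lookup (matchUrlPrefix path L) d with _ | v
          · exact absurd h1 hsome
          · simp

-- B's countdown returns none when no prefix up to i is a key
lemma B_none (path : String) (d : List (String × String)) (i : Nat)
    (h : ∀ j ≤ i, List.lookup (matchUrlPrefix path j) d = none) :
    matchUrlAltGo path d i = none := by
  induction i with
  | zero => exact h 0 (le_refl 0)
  | succ i ih =>
    rw [matchUrlAltGo, h (i + 1) (le_refl _)]
    exact ih (fun j hj => h j (le_trans hj (Nat.le_succ i)))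

-- B's countdown returns the lookup at the highest prefix length that is a key
lemma B_hit (path : String) (d : List (String × String)) (i L : Nat)
    (hLi : L ≤ i) (hsome : List.lookup (matchUrlPrefix path L) d ≠ none)
    (habove : ∀ j, L < j → j ≤ i → List.lookup (matchUrlPrefix path j) d = none) :
    matchUrlAltGo path d i = List.lookup (matchUrlPrefix path L) d := by
  induction i with
  | zero =>
    have : L = 0 := Nat.le_zero.mp hLi
    subst this
    rfl
  | succ i ih =>
    by_cases hL : L = i + 1
    · subst hL
      rw [matchUrlAltGo]
      rcases h1 : List.lookup (matchUrlPrefix path (i + 1)) d with _ | v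
      · exact absurd h1 hsome
      · simp
    · have hLi' : L ≤ i := by omega
      rw [matchUrlAltGo, habove (i + 1) (by omega) (le_refl _)]
      exact ih hLi' (fun j hj1 hj2 => habove j hj1 (le_trans hj2 (Nat.le_succ i)))

-- ===== VERDICT (by name: the statement is the Claim_ definition above) =====
theorem match_url_py_spec : Claim_equal_match_url_py := by
  intro path url_to_uid _
  unfold Spec_match_url_py match_url_py match_url_py_alt
  match url_to_uid with
  | none => rfl
  | some d =>
    simp only
    have hn : (PySem.Str.len path).toNat = path.toList.length := by simp
    rcases A_char path d with ⟨hst, hno⟩ | ⟨L, hLn, hsome, hmax, hst⟩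
    · rw [hst, hn]
      symm
      apply B_none
      intro j hj
      rw [lookup_eq_none_iff]
      intro kv hkv he
      exact hno kv hkv (he ▸ prefix_matching path j)
    · rw [hst, hn]
      symm
      apply B_hit path d path.toList.length L hLn hsome
      intro j hj1 hj2
      by_contra hne
      rcases lookup_mem _ _ hne with ⟨kv, hkv, he⟩
      have hmatch : kv.1.toList <+: path.toList := he ▸ prefix_matching path j
      have hlen : kv.1.toList.length = j := by rw [he]; exact prefix_length path j hj2
      have := hmax kv hkv hmatch
      omega
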